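-- pv_equiv track=rewrite | github.com/pierre-achkar/sr4all | src/utils/check_queries.py | summarize_oax_errors
-- ===== SOURCE A (Python) =====
-- def summarize_oax_errors(records):
--     total = len(records)
--     missing_errors = 0
--     no_queries = 0
--     ok_records = 0
--     failed_records = 0
--     error_items = 0
--
--     for r in records:
--         urls = r.get("oax_query")
--         if not isinstance(urls, list) or len(urls) == 0:
--             no_queries += 1
--
--         errors = r.get("oax_query_errors")
--         if not isinstance(errors, list):
--             missing_errors += 1
--             continue
--
--         if errors and all(e is None for e in errors):
--             ok_records += 1
--         elif any(e is not None for e in errors):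
--             failed_records += 1
--             error_items += sum(1 for e in errors if e is not None)
--
--     return {
--         "total": total,
--         "missing_errors": missing_errors,
--         "no_queries": no_queries,
--         "ok_records": ok_records,
--         "failed_records": failed_records,
--         "error_items": error_items,
--     }
-- ===== SOURCE B (Python) =====
-- def summarize_oax_errors(records):
--     err_lists = [r.get("oax_query_errors") for r in records]
--     failed = [e for e in err_lists
--               if isinstance(e, list) and any(x is not None for x in e)]
--     return {
--         "total": len(records),
--         "missing_errors": sum(1 for e in err_lists if not isinstance(e, list)),
--         "no_queries": sum(1 for r in records
--                           if not isinstance(r.get("oax_query"), list)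
--                           or len(r.get("oax_query")) == 0),
--         "ok_records": sum(1 for e in err_lists
--                           if isinstance(e, list) and len(e) > 0
--                           and all(x is None for x in e)),
--         "failed_records": len(failed),
--         "error_items": sum(sum(1 for x in e if x is not None) for e in failed),
--     }
-- ===== Notes on version B (the rewrite author's own statement) =====
-- stated objective: simpler
-- what changed: Replaces A's single stateful loop with six continue-guarded counters by independent per-field comprehensions: the error lists are extracted once, the failed records are filtered once, and each statistic is a direct count/sum over that data.
import Mathlib
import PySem

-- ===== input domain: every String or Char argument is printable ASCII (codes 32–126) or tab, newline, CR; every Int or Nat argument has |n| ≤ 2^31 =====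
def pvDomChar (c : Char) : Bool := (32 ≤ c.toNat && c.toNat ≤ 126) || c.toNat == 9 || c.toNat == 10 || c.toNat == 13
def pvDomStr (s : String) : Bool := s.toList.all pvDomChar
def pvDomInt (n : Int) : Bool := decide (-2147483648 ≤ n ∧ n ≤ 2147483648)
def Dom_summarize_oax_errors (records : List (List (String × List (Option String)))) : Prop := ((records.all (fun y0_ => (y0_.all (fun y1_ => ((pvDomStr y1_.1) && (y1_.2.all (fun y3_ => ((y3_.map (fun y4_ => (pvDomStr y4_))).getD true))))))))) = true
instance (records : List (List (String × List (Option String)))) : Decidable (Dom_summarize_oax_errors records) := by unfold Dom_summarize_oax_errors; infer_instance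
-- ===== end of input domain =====

-- B replaces A's single stateful loop by independent per-field counts over the records (objective: simpler).

-- ===== PORT A =====
-- A's loop: one pass carrying five counters; the 'continue' after a missing
-- error list skips the ok/failed classification for that record.
def summarize_oax_errors (records : List (List (String × List (Option String)))) : List (String × Int) :=
  let total : Int := records.length
  let st := records.foldl
    (fun (s : Int × Int × Int × Int × Int) r =>
      let (missing, noq, ok, failed, items) := s
      let noq : Int :=
        match List.lookup "oax_query" r with
        | none => noq + 1
        | some urls => if urls.length = 0 then noq + 1 else noq
      match List.lookup "oax_query_errors" r with
      | none => (missing + 1, noq, ok, failed, items)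
      | some errors =>
        if (!errors.isEmpty) && errors.all (fun e => e.isNone) then
          (missing, noq, ok + 1, failed, items)
        else if errors.any (fun e => e.isSome) then
          (missing, noq, ok, failed + 1, items + (errors.countP (fun e => e.isSome) : Int))
        else (missing, noq, ok, failed, items))
    (0, 0, 0, 0, 0)
  [("total", total), ("missing_errors", st.1), ("no_queries", st.2.1),
   ("ok_records", st.2.2.1), ("failed_records", st.2.2.2.1), ("error_items", st.2.2.2.2)]

-- ===== PORT B =====
-- B: extract the error lists once, filter the failed ones once, and count each
-- statistic by its own direct pass.
def summarize_oax_errors_alt (records : List (List (String × List (Option String)))) : List (String × Int) :=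
  let errLists := records.map (fun r => List.lookup "oax_query_errors" r)
  let failedL := errLists.filter
    (fun e => match e with | some l => l.any (fun x => x.isSome) | none => false)
  [("total", (records.length : Int)),
   ("missing_errors", (errLists.countP (fun e => e.isNone) : Int)),
   ("no_queries", (records.countP (fun r =>
       match List.lookup "oax_query" r with
       | none => true
       | some urls => urls.length = 0) : Int)),
   ("ok_records", (errLists.countP (fun e => match e with
       | some l => decide (0 < l.length) && l.all (fun x => x.isNone)
       | none => false) : Int)),
   ("failed_records", (failedL.length : Int)),
   ("error_items", ((failedL.map (fun e => match e with
       | some l => (l.countP (fun x => x.isSome) : Int)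
       | none => 0)).sum))]

-- ===== PRECONDITION & SPEC =====
def Spec_summarize_oax_errors (records : List (List (String × List (Option String)))) (out : List (String × Int)) : Prop := out = summarize_oax_errors_alt records
instance (records : List (List (String × List (Option String)))) (out : List (String × Int)) : Decidable (Spec_summarize_oax_errors records out) := by unfold Spec_summarize_oax_errors; infer_instance

-- ===== CLAIM (what is proved, stated in full; the proofs are below) =====
def Claim_equal_summarize_oax_errors : Prop := ∀ (records : List (List (String × List (Option String)))), Dom_summarize_oax_errors records → Spec_summarize_oax_errors records (summarize_oax_errors records)

-- ===== LEMMAS AND PROOFS =====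

-- per-record contributions used to characterise A's fold
def pvStep (s : Int × Int × Int × Int × Int) (r : List (String × List (Option String))) : Int × Int × Int × Int × Int :=
  let (missing, noq, ok, failed, items) := s
  let noq : Int :=
    match List.lookup "oax_query" r with
    | none => noq + 1
    | some urls => if urls.length = 0 then noq + 1 else noq
  match List.lookup "oax_query_errors" r with
  | none => (missing + 1, noq, ok, failed, items)
  | some errors =>
    if (!errors.isEmpty) && errors.all (fun e => e.isNone) then
      (missing, noq, ok + 1, failed, items)
    else if errors.any (fun e => e.isSome) then
      (missing, noq, ok, failed + 1, items + (errors.countP (fun e => e.isSome) : Int))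
    else (missing, noq, ok, failed, items)

def pvMiss (r : List (String × List (Option String))) : Int :=
  match List.lookup "oax_query_errors" r with | none => 1 | some _ => 0
def pvNoq (r : List (String × List (Option String))) : Int :=
  match List.lookup "oax_query" r with
  | none => 1
  | some urls => if urls.length = 0 then 1 else 0
def pvOk (r : List (String × List (Option String))) : Int :=
  match List.lookup "oax_query_errors" r with
  | none => 0
  | some l => if (!l.isEmpty) && l.all (fun e => e.isNone) then 1 else 0
def pvFail (r : List (String × List (Option String))) : Int :=
  match List.lookup "oax_query_errors" r with
  | none => 0
  | some l => if l.any (fun e => e.isSome) then 1 else 0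
def pvItems (r : List (String × List (Option String))) : Int :=
  match List.lookup "oax_query_errors" r with
  | none => 0
  | some l => if l.any (fun e => e.isSome) then (l.countP (fun e => e.isSome) : Int) else 0

lemma pvStep_eq (s : Int × Int × Int × Int × Int) (r : List (String × List (Option String))) :
    pvStep s r = (s.1 + pvMiss r, s.2.1 + pvNoq r, s.2.2.1 + pvOk r,
      s.2.2.2.1 + pvFail r, s.2.2.2.2 + pvItems r) := by
  obtain ⟨m, n, o, f, i⟩ := s
  unfold pvStep pvMiss pvNoq pvOk pvFail pvItems
  rcases h1 : List.lookup "oax_query" r with _ | urls <;>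
    rcases h2 : List.lookup "oax_query_errors" r with _ | errors <;>
    simp only [] <;> (try split_ifs) <;>
    first
    | (simp only [Prod.mk.injEq]; and_intros <;> first | trivial | omega)
    | (exfalso
       have hok : (!errors.isEmpty && errors.all fun e => e.isNone) = true := by assumption
       have hany : (errors.any fun e => e.isSome) = true := by assumption
       simp only [Bool.and_eq_true, List.all_eq_true, List.any_eq_true] at hok hany
       obtain ⟨x, hx, hs⟩ := hany
       have := hok.2 x hx
       simp_all)

lemma pvFold_char (recs : List (List (String × List (Option String))))
    (m n o f i : Int) :
    recs.foldl pvStep (m, n, o, f, i) =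
      (m + (recs.map pvMiss).sum, n + (recs.map pvNoq).sum,
       o + (recs.map pvOk).sum, f + (recs.map pvFail).sum,
       i + (recs.map pvItems).sum) := by
  induction recs generalizing m n o f i with
  | nil => simp
  | cons r recs ih =>
    rw [List.foldl_cons, pvStep_eq, ih]
    simp only [List.map_cons, List.sum_cons, Prod.mk.injEq]
    refine ⟨by ring, by ring, by ring, by ring, by ring⟩

lemma pvNotEmpty_eq {α : Type} (l : List α) : (!l.isEmpty) = decide (0 < l.length) := by
  cases l <;> simp

lemma pvMiss_count (recs : List (List (String × List (Option String)))) :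
    (recs.map pvMiss).sum =
      ((recs.map (fun r => List.lookup "oax_query_errors" r)).countP (fun e => e.isNone) : Int) := by
  induction recs with
  | nil => simp
  | cons r recs ih =>
    simp only [List.map_cons, List.sum_cons, List.countP_cons, ih, pvMiss]
    rcases List.lookup "oax_query_errors" r with _ | l <;> (simp <;> omega)

lemma pvNoq_count (recs : List (List (String × List (Option String)))) :
    (recs.map pvNoq).sum =
      (recs.countP (fun r => match List.lookup "oax_query" r with
        | none => true | some urls => decide (urls.length = 0)) : Int) := by
  induction recs with
  | nil => simp
  | cons r recs ih =>
    simp only [List.map_cons, List.sum_cons, List.countP_cons, ih, pvNoq]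
    rcases h : List.lookup "oax_query" r with _ | urls
    · simp; push_cast; omega
    · by_cases hl : urls.length = 0 <;> (simp [hl] <;> omega)

lemma pvOk_count (recs : List (List (String × List (Option String)))) :
    (recs.map pvOk).sum =
      ((recs.map (fun r => List.lookup "oax_query_errors" r)).countP
        (fun e => match e with
        | some l => decide (0 < l.length) && l.all (fun x => x.isNone)
        | none => false) : Int) := by
  induction recs with
  | nil => simp
  | cons r recs ih =>
    simp only [List.map_cons, List.sum_cons, List.countP_cons, ih, pvOk]
    rcases List.lookup "oax_query_errors" r with _ | l
    · simp
    · by_cases h : (decide (0 < l.length) && l.all (fun x => x.isNone)) = true <;>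
        simp [pvNotEmpty_eq, h] <;> push_cast <;> omega

lemma pvFail_count (recs : List (List (String × List (Option String)))) :
    (recs.map pvFail).sum =
      (((recs.map (fun r => List.lookup "oax_query_errors" r)).filter
        (fun e => match e with | some l => l.any (fun x => x.isSome) | none => false)).length : Int) := by
  induction recs with
  | nil => simp
  | cons r recs ih =>
    simp only [List.map_cons, List.filter_cons, ih, pvFail, List.sum_cons]
    rcases List.lookup "oax_query_errors" r with _ | l
    · simp
    · by_cases h : l.any (fun x => x.isSome) = true <;> (simp [h] <;> omega)

lemma pvItems_sum (recs : List (List (String × List (Option String)))) :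
    (recs.map pvItems).sum =
      (((recs.map (fun r => List.lookup "oax_query_errors" r)).filter
        (fun e => match e with | some l => l.any (fun x => x.isSome) | none => false)).map
        (fun e => match e with
        | some l => (l.countP (fun x => x.isSome) : Int)
        | none => 0)).sum := by
  induction recs with
  | nil => simp
  | cons r recs ih =>
    simp only [List.map_cons, List.filter_cons, List.sum_cons, ih, pvItems]
    rcases List.lookup "oax_query_errors" r with _ | l
    · simp
    · by_cases h : l.any (fun x => x.isSome) = true <;> simp [h]

-- ===== VERDICT (by name: the statement is the Claim_ definition above) =====
theorem summarize_oax_errors_spec : Claim_equal_summarize_oax_errors := by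
  intro records _
  show summarize_oax_errors records = summarize_oax_errors_alt records
  unfold summarize_oax_errors summarize_oax_errors_alt
  have hfold : records.foldl
      (fun (s : Int × Int × Int × Int × Int) r =>
        let (missing, noq, ok, failed, items) := s
        let noq : Int :=
          match List.lookup "oax_query" r with
          | none => noq + 1
          | some urls => if urls.length = 0 then noq + 1 else noq
        match List.lookup "oax_query_errors" r with
        | none => (missing + 1, noq, ok, failed, items)
        | some errors =>
          if (!errors.isEmpty) && errors.all (fun e => e.isNone) then
            (missing, noq, ok + 1, failed, items)
          else if errors.any (fun e => e.isSome) then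
            (missing, noq, ok, failed + 1, items + (errors.countP (fun e => e.isSome) : Int))
          else (missing, noq, ok, failed, items)) (0, 0, 0, 0, 0) =
      records.foldl pvStep (0, 0, 0, 0, 0) := by rfl
  simp only [hfold, pvFold_char, zero_add, pvMiss_count, pvNoq_count, pvOk_count,
    pvFail_count, pvItems_sum]
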